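-- pv_equiv track=rewrite | github.com/songmii/Calculator-Project | Mode1_funcs/md1_integral.py | make_beautiful_func
-- ===== SOURCE A (Python) =====
-- def make_beautiful_func(input_func: str):
--     func = input_func.replace("^", "**")  # eval 사용 시 ^가 비트연산자로 인식되므로 **로 바꿔서 지수표현으로 수정
--     func = func.replace("root", "sqrt")
--
--     # x 앞에 숫자가 있어도 돌아가도록 수정 (x**3 + 2x**2 - 8x + 2)
--     x_index = [i for i in range(len(func)) if func[i] == 'x']  # x의 위치
--
--     plus_index = 0  # 문자를 추가할거니까 추가한 만큼 인덱스에 더할 값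
--     for ind in x_index:
--         ind += plus_index
--         if func[ind - 1].isdigit() and ind:
--             func = func[:ind] + ' * ' + func[ind:]
--             plus_index += 3
--
--     return func
-- ===== SOURCE B (Python) =====
-- def make_beautiful_func(input_func: str):
--     func = input_func.replace("^", "**")
--     func = func.replace("root", "sqrt")
--     # single forward scan: insert ' * ' before an 'x' whose previous character is a digit
--     out = []
--     prev = ''
--     for c in func:
--         if c == 'x' and prev.isdigit():
--             out.append(' * ')
--         out.append(c)
--         prev = c
--     return ''.join(out)
-- ===== Notes on version B (the rewrite author's own statement) =====
-- stated objective: simpler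
-- what changed: A precomputes the list of positions of the variable letter and then runs a mutating insertion pass over string slices while tracking an index offset; B does one forward scan that remembers only the previous character and emits the multiplication infix before a variable letter preceded by a digit, with no position list, no offset and no slicing.
import Mathlib
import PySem

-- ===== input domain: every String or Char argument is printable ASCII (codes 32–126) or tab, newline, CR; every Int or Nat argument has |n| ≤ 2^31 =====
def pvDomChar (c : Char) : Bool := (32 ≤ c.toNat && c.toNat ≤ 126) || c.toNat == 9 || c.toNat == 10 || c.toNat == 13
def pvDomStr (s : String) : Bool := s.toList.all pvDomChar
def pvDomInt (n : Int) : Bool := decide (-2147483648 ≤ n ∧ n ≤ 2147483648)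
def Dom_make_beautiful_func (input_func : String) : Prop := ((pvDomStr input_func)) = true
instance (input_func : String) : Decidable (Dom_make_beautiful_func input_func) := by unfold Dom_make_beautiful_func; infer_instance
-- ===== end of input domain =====

-- B replaces A's precomputed x-position list + offset-tracking insertion pass by one forward scan
-- that carries only the previous character (objective: simpler); same return value everywhere.

-- ===== PORT A =====
-- x_index = [i for i in range(len(func)) if func[i] == 'x']
def pvXIdxA (l : List Char) : List Nat :=
  (List.range l.length).filter (fun i => l[i]? == some 'x')

-- one iteration of A's for-loop over x_index; state = (func, plus_index).
-- func[ind-1] is ported with pyGetD: it is always in range here (the string contains an 'x',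
-- hence is nonempty, and -1 ≤ ind-1 < len), so Python never raises on this access.
def pvStepA (fp : List Char × Int) (i0 : Nat) : List Char × Int :=
  let ind : Int := (i0 : Int) + fp.2
  if PySem.Chars.isdigit (PySem.List.pyGetD fp.1 (ind - 1) ' ') && (ind != 0) then
    (PySem.List.slice fp.1 none (some ind) ++ (' ' :: '*' :: ' ' :: []) ++
       PySem.List.slice fp.1 (some ind) none, fp.2 + 3)
  else fp

def make_beautiful_func (input_func : String) : String :=
  let func := PySem.Str.replace input_func "^" "**"
  let func := PySem.Str.replace func "root" "sqrt"
  String.ofList (List.foldl pvStepA (func.toList, 0) (pvXIdxA func.toList)).1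

-- ===== PORT B =====
-- one iteration of B's single scan; state = (out, prev)  (prev = '' is ported as none)
def pvStepB (st : List Char × Option Char) (c : Char) : List Char × Option Char :=
  (st.1 ++ (if c == 'x' && (st.2.elim false PySem.Chars.isdigit) then
              ' ' :: '*' :: ' ' :: c :: [] else [c]), some c)

def make_beautiful_func_alt (input_func : String) : String :=
  let func := PySem.Str.replace input_func "^" "**"
  let func := PySem.Str.replace func "root" "sqrt"
  String.ofList (List.foldl pvStepB ([], none) func.toList).1

-- ===== PRECONDITION & SPEC =====
def Spec_make_beautiful_func (input_func : String) (out : String) : Prop := out = make_beautiful_func_alt input_func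
instance (input_func : String) (out : String) : Decidable (Spec_make_beautiful_func input_func out) := by unfold Spec_make_beautiful_func; infer_instance

-- ===== CLAIM (what is proved, stated in full; the proofs are below) =====
def Claim_equal_make_beautiful_func : Prop := ∀ (input_func : String), Dom_make_beautiful_func input_func → Spec_make_beautiful_func input_func (make_beautiful_func input_func)

-- ===== LEMMAS AND PROOFS =====

/-- Specification-level single scan: what one pass with a remembered previous character emits. -/
def pvChunk (p : Option Char) (c : Char) : List Char :=
  if c == 'x' && p.elim false PySem.Chars.isdigit then ' ' :: '*' :: ' ' :: c :: [] else [c]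

def pvScan (p : Option Char) : List Char → List Char
  | [] => []
  | c :: r => pvChunk p c ++ pvScan (some c) r

theorem pvStepB_scan (l : List Char) :
    ∀ (acc : List Char) (p : Option Char),
      (List.foldl pvStepB (acc, p) l).1 = acc ++ pvScan p l := by
  induction l with
  | nil => intro acc p; simp [pvScan]
  | cons c r ih =>
      intro acc p
      simp [List.foldl, pvStepB, pvScan, pvChunk, ih]

theorem pvXIdxA_nil : pvXIdxA [] = [] := by simp [pvXIdxA]

theorem pvXIdxA_cons (c : Char) (t : List Char) :
    pvXIdxA (c :: t) = (if c == 'x' then [0] else []) ++ (pvXIdxA t).map (· + 1) := by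
  have htail : List.filter ((fun i => (c :: t)[i]? == some 'x') ∘ Nat.succ) (List.range t.length)
      = List.filter (fun i => t[i]? == some 'x') (List.range t.length) := by
    apply List.filter_congr; intro i _; simp
  unfold pvXIdxA
  rw [show (c :: t).length = t.length + 1 from rfl, List.range_succ_eq_map,
      List.filter_cons, List.filter_map, htail]
  by_cases h : c = 'x' <;> simp [h]

theorem pvGetD_append_last (w v : List Char) (h : w ≠ []) (d : Char) :
    PySem.List.pyGetD (w ++ v) ((w.length : Int) - 1) d = w.getLast h := by
  have hlen : 1 ≤ w.length := List.length_pos_of_ne_nil h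
  have : ((w.length : Int) - 1) = ((w.length - 1 : Nat) : Int) := by omega
  rw [this, PySem.List.pyGetD_natCast]
  rw [List.getD, List.getElem?_append_left (by omega)]
  rw [List.getLast_eq_getElem]
  simp [List.getElem?_eq_getElem (show w.length - 1 < w.length by omega)]

/-- Main invariant: processing the x-indices of `v`, shifted by `k`, on the state
    `(w ++ v, p)` with `w.length = k + p`, yields the single-scan result. -/
theorem pvMain (v : List Char) :
    ∀ (w : List Char) (k : Nat) (p : Int), (w.length : Int) = (k : Int) + p →
      List.foldl pvStepA (w ++ v, p) ((pvXIdxA v).map (· + k)) =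
        (w ++ pvScan w.getLast? v,
         p + ((pvScan w.getLast? v).length : Int) - (v.length : Int)) := by
  induction v with
  | nil => intro w k p hw; simp [pvXIdxA_nil, pvScan]
  | cons c t ih =>
      intro w k p hw
      rw [pvXIdxA_cons, List.map_append, List.map_map]
      have hmap : ((pvXIdxA t).map ((· + k) ∘ (· + 1))) = (pvXIdxA t).map (· + (k + 1)) := by
        congr 1; funext i; simp [Function.comp]; omega
      rw [hmap]
      by_cases hc : c = 'x'
      · subst hc
        simp only [beq_self_eq_true, if_true]
        rw [show List.map (· + k) [0] = [k] by simp]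
        rw [List.singleton_append, List.foldl_cons]
        by_cases hw0 : w = []
        · -- leading 'x': ind = 0, the `and ind` guard blocks the insertion
          subst hw0
          have hp : p = -(k : Int) := by simp at hw; omega
          have hstep : pvStepA (([] : List Char) ++ 'x' :: t, p) k = ([] ++ 'x' :: t, p) := by
            simp [pvStepA, hp]
          rw [hstep]
          rw [show (([] : List Char) ++ 'x' :: t) = ['x'] ++ t by simp]
          rw [ih (['x']) (k + 1) p (by simp; omega)]
          simp [pvScan, pvChunk]
          omega
        · have hlast : PySem.List.pyGetD (w ++ 'x' :: t) ((k : Int) + p - 1) ' '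
              = w.getLast hw0 := by
            rw [show ((k : Int) + p - 1) = ((w.length : Int) - 1) by omega]
            exact pvGetD_append_last w ('x' :: t) hw0 ' '
          have hpos : 1 ≤ w.length := List.length_pos_of_ne_nil hw0
          have hne : (((k : Int) + p) != 0) = true := by simp; omega
          have hwl : w.getLast? = some (w.getLast hw0) := by simp [List.getLast?_eq_some_getLast hw0]
          by_cases hd : PySem.Chars.isdigit (w.getLast hw0) = true
          · -- digit before 'x': A inserts ' * ', matching the scan's 4-char chunk
            have hstep : pvStepA (w ++ 'x' :: t, p) k =
                ((w ++ [' ', '*', ' ', 'x']) ++ t, p + 3) := by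
              unfold pvStepA
              simp only [hlast, hd, hne, Bool.and_self, if_true]
              rw [show ((k : Int) + p) = ((w.length : Nat) : Int) by omega]
              rw [PySem.List.slice_to_natCast, PySem.List.slice_from_natCast,
                  List.take_left, List.drop_left]
              simp
            rw [hstep, ih (w ++ [' ', '*', ' ', 'x']) (k + 1) (p + 3) (by simp; omega)]
            rw [show (w ++ [' ', '*', ' ', 'x']).getLast? = some 'x' by simp, hwl]
            simp [pvScan, pvChunk, hd]
            omega
          · -- non-digit before 'x': no insertion on either side
            have hstep : pvStepA (w ++ 'x' :: t, p) k = (w ++ 'x' :: t, p) := by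
              unfold pvStepA
              simp only [hlast]
              simp [hd]
            rw [hstep]
            rw [show (w ++ 'x' :: t : List Char) = (w ++ ['x']) ++ t by simp]
            rw [ih (w ++ ['x']) (k + 1) p (by simp; omega)]
            rw [show (w ++ ['x']).getLast? = some 'x' by simp, hwl]
            simp [pvScan, pvChunk, hd]
            omega
      · -- c ≠ 'x': this position is skipped by A's index list and copied by the scan
        have hcb : (c == 'x') = false := by simp [hc]
        simp only [hcb, Bool.false_eq_true, if_false, List.map_nil, List.nil_append]
        rw [show (w ++ c :: t : List Char) = (w ++ [c]) ++ t by simp]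
        rw [ih (w ++ [c]) (k + 1) p (by simp; omega)]
        rw [show (w ++ [c]).getLast? = some c by simp]
        simp [pvScan, pvChunk, hcb]
        omega

-- ===== VERDICT (by name: the statement is the Claim_ definition above) =====
theorem make_beautiful_func_spec : Claim_equal_make_beautiful_func := by
  intro input_func _
  unfold Spec_make_beautiful_func make_beautiful_func make_beautiful_func_alt
  dsimp only
  set l := (PySem.Str.replace (PySem.Str.replace input_func "^" "**") "root" "sqrt").toList with hl
  have hA := pvMain l [] 0 0 (by simp)
  rw [show (pvXIdxA l).map (· + 0) = pvXIdxA l by simp] at hA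
  simp only [List.nil_append] at hA
  rw [hA, pvStepB_scan l [] none]
  simp
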